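-- pv_equiv track=rewrite | github.com/molqzone/cmsis-dsp-vs-eigen | benchmark_analysis/generate_readable_report.py | parse_signature
-- ===== SOURCE A (Python) =====
-- def parse_signature(signature: str) -> tuple[str, str, str, str]:
--     """Parses phenomenon signature text into structured fields."""
--
--     # Example: mul:CCCCCCCC:cross=none|inv:CCCCC:cross=none
--     sections = signature.split("|")
--     mul_pattern = ""
--     mul_cross = "none"
--     inv_pattern = ""
--     inv_cross = "none"
--     for section in sections:
--         fields = section.split(":")
--         if len(fields) != 3:
--             continue
--         op = fields[0]
--         pattern = fields[1]
--         cross = fields[2].replace("cross=", "")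
--         if op == "mul":
--             mul_pattern = pattern
--             mul_cross = cross
--         elif op == "inv":
--             inv_pattern = pattern
--             inv_cross = cross
--     return mul_pattern, mul_cross, inv_pattern, inv_cross
-- ===== SOURCE B (Python) =====
-- def parse_signature(signature: str) -> tuple[str, str, str, str]:
--     """Parses phenomenon signature text into structured fields."""
--     sections = signature.split("|")
--
--     def lookup(op):
--         # last-wins = first valid matching section scanning back-to-front
--         for section in reversed(sections):
--             fields = section.split(":")
--             if len(fields) == 3 and fields[0] == op:
--                 return fields[1], fields[2].replace("cross=", "")
--         return "", "none"
--
--     mul_pattern, mul_cross = lookup("mul")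
--     inv_pattern, inv_cross = lookup("inv")
--     return mul_pattern, mul_cross, inv_pattern, inv_cross
-- ===== Notes on version B (the rewrite author's own statement) =====
-- stated objective: alternative
-- what changed: Replaces A's single forward pass with a four-field accumulator and if/elif branches by two independent back-to-front searches with early exit: a lookup(op) helper scans reversed(sections) and returns the first valid matching section (which is A's last-wins winner), defaulting to ('', 'none').
import Mathlib
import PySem

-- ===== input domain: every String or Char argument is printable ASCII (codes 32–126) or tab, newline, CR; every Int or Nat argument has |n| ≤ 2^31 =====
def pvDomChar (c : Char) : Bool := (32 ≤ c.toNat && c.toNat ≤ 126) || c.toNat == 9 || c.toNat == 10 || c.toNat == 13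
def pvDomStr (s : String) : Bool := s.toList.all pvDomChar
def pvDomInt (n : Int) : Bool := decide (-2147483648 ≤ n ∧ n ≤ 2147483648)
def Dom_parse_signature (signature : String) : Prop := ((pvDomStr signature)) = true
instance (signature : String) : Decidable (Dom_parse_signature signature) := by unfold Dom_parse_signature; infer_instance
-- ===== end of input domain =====

-- ===== PORT A =====
-- B replaces A's single forward pass (4-field accumulator, if/elif) by two independent
-- back-to-front searches with early exit; last-wins = first match in reverse (alternative; same cost).

-- loop body of A's for-loop over the "|"-sections
-- (split? returns none only for an empty separator; the separators here are the literals "|" and ":",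
--  so the .getD [] default is never taken)
def pvStepA (st : String × String × String × String) (section_ : String) :
    String × String × String × String :=
  let fields := (PySem.Str.split? section_ ":").getD []
  if fields.length ≠ 3 then st
  else
    let op := fields.getD 0 ""
    let pattern := fields.getD 1 ""
    let cross := PySem.Str.replace (fields.getD 2 "") "cross=" ""
    if op = "mul" then (pattern, cross, st.2.2.1, st.2.2.2)
    else if op = "inv" then (st.1, st.2.1, pattern, cross)
    else st

def parse_signature (signature : String) : String × String × String × String :=
  ((PySem.Str.split? signature "|").getD []).foldl pvStepA ("", "none", "", "none")

-- ===== PORT B =====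
-- B's lookup(op): scan the (already reversed) section list, return the first valid match
def pvLookup (op : String) : List String → String × String
  | [] => ("", "none")
  | s :: rest =>
    let fields := (PySem.Str.split? s ":").getD []
    if fields.length = 3 ∧ fields.getD 0 "" = op then
      (fields.getD 1 "", PySem.Str.replace (fields.getD 2 "") "cross=" "")
    else pvLookup op rest

def parse_signature_alt (signature : String) : String × String × String × String :=
  let sections := (PySem.Str.split? signature "|").getD []
  let mul := pvLookup "mul" sections.reverse
  let inv := pvLookup "inv" sections.reverse
  (mul.1, mul.2, inv.1, inv.2)

-- ===== PRECONDITION & SPEC =====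
def Spec_parse_signature (signature : String) (out : String × String × String × String) : Prop := out = parse_signature_alt signature
instance (signature : String) (out : String × String × String × String) : Decidable (Spec_parse_signature signature out) := by unfold Spec_parse_signature; infer_instance

-- ===== CLAIM (what is proved, stated in full; the proofs are below) =====
def Claim_equal_parse_signature : Prop := ∀ (signature : String), Dom_parse_signature signature → Spec_parse_signature signature (parse_signature signature)

-- ===== LEMMAS AND PROOFS =====

-- pvLookup with an explicit fallback value, for stating the loop invariant
def pvLookupD (op : String) (d : String × String) : List String → String × String
  | [] => d
  | s :: rest =>
    let fields := (PySem.Str.split? s ":").getD []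
    if fields.length = 3 ∧ fields.getD 0 "" = op then
      (fields.getD 1 "", PySem.Str.replace (fields.getD 2 "") "cross=" "")
    else pvLookupD op d rest

theorem pvLookup_eq_D (op : String) (l : List String) :
    pvLookup op l = pvLookupD op ("", "none") l := by
  induction l with
  | nil => rfl
  | cons s rest ih => simp only [pvLookup, pvLookupD, ih]

theorem pvLookupD_append (op : String) (d : String × String) (l₁ l₂ : List String) :
    pvLookupD op d (l₁ ++ l₂) = pvLookupD op (pvLookupD op d l₂) l₁ := by
  induction l₁ with
  | nil => rfl
  | cons s rest ih => simp only [List.cons_append, pvLookupD, ih]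

-- one step of A, read through the two reverse lookups
theorem pvStep_mul (st : String × String × String × String) (s : String) :
    ((pvStepA st s).1, (pvStepA st s).2.1) = pvLookupD "mul" (st.1, st.2.1) [s] := by
  simp only [pvStepA, pvLookupD]
  rcases h : (PySem.Str.split? s ":").getD [] with _ | ⟨a, _ | ⟨b, _ | ⟨c, _ | ⟨d, l⟩⟩⟩⟩ <;>
    simp [List.getD] <;>
    by_cases hm : a = "mul" <;> by_cases hi : a = "inv" <;> simp_all

theorem pvStep_inv (st : String × String × String × String) (s : String) :
    (pvStepA st s).2.2 = pvLookupD "inv" st.2.2 [s] := by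
  simp only [pvStepA, pvLookupD]
  rcases h : (PySem.Str.split? s ":").getD [] with _ | ⟨a, _ | ⟨b, _ | ⟨c, _ | ⟨d, l⟩⟩⟩⟩ <;>
    simp [List.getD] <;>
    by_cases hm : a = "mul" <;> by_cases hi : a = "inv" <;> simp_all

-- the loop invariant: A's fold equals the two reverse lookups with the state as fallback
theorem pvFoldl_eq_lookup (ss : List String) (st : String × String × String × String) :
    ss.foldl pvStepA st =
      ((pvLookupD "mul" (st.1, st.2.1) ss.reverse).1,
       (pvLookupD "mul" (st.1, st.2.1) ss.reverse).2,
       (pvLookupD "inv" st.2.2 ss.reverse).1,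
       (pvLookupD "inv" st.2.2 ss.reverse).2) := by
  induction ss generalizing st with
  | nil => rfl
  | cons s rest ih =>
    simp only [List.foldl_cons, List.reverse_cons, pvLookupD_append,
      ← pvStep_mul, ← pvStep_inv]
    exact ih (pvStepA st s)

-- ===== VERDICT (by name: the statement is the Claim_ definition above) =====
theorem parse_signature_spec : Claim_equal_parse_signature := by
  intro signature _
  show parse_signature signature = parse_signature_alt signature
  unfold parse_signature parse_signature_alt
  rw [pvFoldl_eq_lookup]
  simp only [pvLookup_eq_D]
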